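-- pv_equiv track=rewrite | github.com/pdk5mjmvfd-cpu/primeFluX.ai | combinatoric/interpreter.py | _detect_self_recursion
-- ===== SOURCE A (Python) =====
-- def _detect_self_recursion(tokens: list[str]) -> list[int]:
--     """
--     Detect self-recursion (function calling itself).
--
--     Args:
--         tokens: List of tokens
--
--     Returns:
--         List of token indices where self-recursion occurs
--     """
--     recursion_indices = []
--
--     # Look for function definition followed by same name in body
--     for i in range(len(tokens) - 1):
--         # Check for "def name" pattern
--         if tokens[i] == "def" and i + 1 < len(tokens):
--             func_name = tokens[i + 1].split("(")[0]  # Extract function name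
--
--             # Look for same name later (self-call)
--             for j in range(i + 2, len(tokens)):
--                 if tokens[j] == func_name or tokens[j].startswith(func_name + "("):
--                     recursion_indices.append(j)
--
--     return recursion_indices
-- ===== SOURCE B (Python) =====
-- def _detect_self_recursion(tokens: list[str]) -> list[int]:
--     """One right-to-left pass: a dict maps each base name (part before '(')
--     to the linked list of positions where it occurs further right, so each
--     'def' reads its self-call indices in O(1) instead of rescanning the tail.
--     A token matches func_name iff it equals it or starts with func_name + '(',
--     i.e. iff its own base name equals func_name."""
--     later = {}   # base name -> linked list (index, rest) of positions > current i+1, ascending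
--     chunks = []
--     for i in range(len(tokens) - 2, -1, -1):
--         base = tokens[i + 1].split("(")[0]
--         if tokens[i] == "def":
--             chunks.append(later.get(base))
--         later[base] = (i + 1, later.get(base))
--     out = []
--     for cell in reversed(chunks):
--         while cell is not None:
--             out.append(cell[0])
--             cell = cell[1]
--     return out
-- ===== Notes on version B (the rewrite author's own statement) =====
-- stated objective: faster
-- what changed: Instead of rescanning the whole tail of the token list for every 'def' (nested loops), B makes one right-to-left pass that maintains a dict from base name (the part before '(') to the linked list of positions where it occurs further right, so each 'def' obtains all its self-call indices by a single O(1) dict lookup; a token matches func_name exactly when its own base name equals func_name.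
import Mathlib
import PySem

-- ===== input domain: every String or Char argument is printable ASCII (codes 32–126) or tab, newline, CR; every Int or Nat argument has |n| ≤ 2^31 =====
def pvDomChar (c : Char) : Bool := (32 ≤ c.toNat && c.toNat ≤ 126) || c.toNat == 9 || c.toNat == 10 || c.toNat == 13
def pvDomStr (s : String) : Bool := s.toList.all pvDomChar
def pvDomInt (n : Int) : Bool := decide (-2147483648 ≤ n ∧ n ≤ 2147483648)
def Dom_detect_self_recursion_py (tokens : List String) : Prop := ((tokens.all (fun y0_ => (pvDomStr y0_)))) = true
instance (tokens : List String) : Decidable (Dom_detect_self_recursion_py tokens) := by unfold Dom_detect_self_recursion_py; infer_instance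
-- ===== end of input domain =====

-- B replaces A's per-def rescan of the whole tail by one right-to-left pass that indexes
-- positions by base name (the part before '(') in a dict, reading each def's matches in O(1).

-- ===== PORT A =====
-- tokens[k].split("(")[0], used by both Pythons ('func_name' in A, 'base' in B)
def pyBase (t : String) : String :=
  PySem.List.pyGetD ((PySem.Str.split? t "(").getD []) 0 ""

def detect_self_recursion_py (tokens : List String) : List Int :=
  (PySem.List.pyRange 0 ((tokens.length : Int) - 1) 1).foldl (fun acc i =>
    if PySem.List.pyGetD tokens i "" == "def" && decide (i + 1 < (tokens.length : Int)) then
      let func_name := pyBase (PySem.List.pyGetD tokens (i + 1) "")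
      (PySem.List.pyRange (i + 2) ((tokens.length : Int)) 1).foldl (fun acc2 j =>
        if PySem.List.pyGetD tokens j "" == func_name
            || PySem.Str.startswith (PySem.List.pyGetD tokens j "") (func_name ++ "(") then
          acc2 ++ [j]
        else acc2) acc
    else acc) []

-- ===== PORT B =====
-- the linked list (index, rest)/None of Source B is List Int here (None = [], (i, r) = i :: r)
def detect_self_recursion_py_alt (tokens : List String) : List Int :=
  let st := (PySem.List.pyRange ((tokens.length : Int) - 2) (-1) (-1)).foldl
    (fun (st : PySem.Dict String (List Int) × List (List Int)) i =>
      let base := pyBase (PySem.List.pyGetD tokens (i + 1) "")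
      let chunks := if PySem.List.pyGetD tokens i "" == "def"
        then st.2 ++ [st.1.getD base []] else st.2
      (st.1.insert base ((i + 1) :: st.1.getD base []), chunks))
    (PySem.Dict.empty, [])
  st.2.reverse.foldl (fun out cell => out ++ cell) []

-- ===== PRECONDITION & SPEC =====
def Spec_detect_self_recursion_py (tokens : List String) (out : List Int) : Prop := out = detect_self_recursion_py_alt tokens
instance (tokens : List String) (out : List Int) : Decidable (Spec_detect_self_recursion_py tokens out) := by unfold Spec_detect_self_recursion_py; infer_instance

-- ===== CLAIM (what is proved, stated in full; the proofs are below) =====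
def Claim_equal_detect_self_recursion_py : Prop := ∀ (tokens : List String), Dom_detect_self_recursion_py tokens → Spec_detect_self_recursion_py tokens (detect_self_recursion_py tokens)

-- ===== LEMMAS AND PROOFS =====

-- ---- string side: pyBase t is the prefix of t before the first '(' ----

lemma go_acc (sep : List Char) (fuel : Nat) : ∀ (l cur : List Char) (acc : List (List Char)),
    PySem.Chars.splitOn.go sep fuel l cur acc = acc.reverse ++ PySem.Chars.splitOn.go sep fuel l cur [] := by
  induction fuel with
  | zero => intro l cur acc; simp [PySem.Chars.splitOn.go]
  | succ fuel ih =>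
    intro l cur acc
    match l with
    | [] => simp [PySem.Chars.splitOn.go]
    | c :: rest =>
      simp only [PySem.Chars.splitOn.go]
      split
      · rw [ih _ _ (cur.reverse :: acc), ih _ _ [cur.reverse]]; simp
      · exact ih rest (c :: cur) acc

lemma go_ne_nil (sep : List Char) (fuel : Nat) : ∀ (l cur : List Char) (acc : List (List Char)),
    PySem.Chars.splitOn.go sep fuel l cur acc ≠ [] := by
  induction fuel with
  | zero => intro l cur acc; simp [PySem.Chars.splitOn.go]
  | succ fuel ih =>
    intro l cur acc
    match l with
    | [] => simp [PySem.Chars.splitOn.go]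
    | c :: rest =>
      simp only [PySem.Chars.splitOn.go]
      split
      · exact ih _ _ _
      · exact ih _ _ _

lemma go_nil_head (fuel : Nat) : ∀ (l cur : List Char), l.length ≤ fuel →
    (PySem.Chars.splitOn.go ['('] fuel l cur []).headD [] = cur.reverse ++ l.takeWhile (· ≠ '(') := by
  induction fuel with
  | zero =>
    intro l cur h
    have : l = [] := List.length_eq_zero_iff.mp (Nat.le_zero.mp h)
    subst this; simp [PySem.Chars.splitOn.go]
  | succ fuel ih =>
    intro l cur h
    match l with
    | [] => simp [PySem.Chars.splitOn.go]
    | c :: rest =>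
      simp only [PySem.Chars.splitOn.go]
      split
      · rename_i hp
        have hc : '(' = c := by
          simpa [List.isPrefixOf] using hp
        rw [go_acc]
        subst hc
        simp
      · rename_i hp
        have hc : ¬ (c = '(') := by
          intro hc; subst hc; simp [List.isPrefixOf] at hp
        rw [ih rest (c :: cur) (by simpa using Nat.le_of_succ_le_succ h)]
        simp [hc]

lemma splitOn_paren_head (cs : List Char) :
    (PySem.Chars.splitOn cs ['(']).headD [] = cs.takeWhile (· ≠ '(') := by
  unfold PySem.Chars.splitOn
  rw [go_nil_head (cs.length + 1) cs [] (by omega)]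
  simp

lemma toList_pyBase (t : String) : (pyBase t).toList = t.toList.takeWhile (· ≠ '(') := by
  unfold pyBase
  have h1 : ("(" : String).toList = ['('] := by decide
  simp [PySem.Str.split?, PySem.Chars.split?, h1]
  obtain ⟨x, rest, hx⟩ : ∃ x rest, PySem.Chars.splitOn t.toList ['('] = x :: rest := by
    rcases h : PySem.Chars.splitOn t.toList ['('] with _ | ⟨x, rest⟩
    · exact absurd h (by unfold PySem.Chars.splitOn; exact go_ne_nil _ _ _ _ _)
    · exact ⟨x, rest, rfl⟩
  rw [hx]
  have hh := splitOn_paren_head t.toList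
  rw [hx] at hh
  simp at hh
  simp [PySem.List.pyGetD_ofNat', hh]

lemma chars_cond (ts fs : List Char) (hf : '(' ∉ fs) :
    (ts = fs ∨ fs ++ ['('] <+: ts) ↔ ts.takeWhile (· ≠ '(') = fs := by
  constructor
  · rintro (rfl | ⟨r, rfl⟩)
    · exact List.takeWhile_eq_self_iff.mpr (by intro x hx; simp; exact fun h => hf (h ▸ hx))
    · rw [List.append_assoc, List.takeWhile_append_of_pos (by intro x hx; simp; exact fun h => hf (h ▸ hx))]
      simp
  · intro h
    have hsplit : ts = fs ++ ts.dropWhile (· ≠ '(') := by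
      conv_lhs => rw [← List.takeWhile_append_dropWhile (p := (· ≠ '(')) (l := ts)]
      rw [h]
    rcases hd : ts.dropWhile (· ≠ '(') with _ | ⟨c, d⟩
    · left; rw [hsplit, hd]; simp
    · right
      have hne : ts.dropWhile (· ≠ '(') ≠ [] := by rw [hd]; simp
      have h4 : (ts.dropWhile (· ≠ '(')).head hne = c := by
        apply Option.some_injective
        rw [← List.head?_eq_some_head, hd]; rfl
      have hc := List.head_dropWhile_not (fun x => decide (x ≠ '(')) hne
      rw [h4] at hc
      have : c = '(' := by simpa using hc
      subst this
      exact ⟨d, by rw [hsplit, hd]; simp⟩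

-- A's inner test equals comparing base names
lemma cond_eq (t s : String) :
    ((t == pyBase s) || PySem.Str.startswith t (pyBase s ++ "(")) = (pyBase t == pyBase s) := by
  have hf : '(' ∉ (pyBase s).toList := by
    rw [toList_pyBase]
    intro h
    have := List.mem_takeWhile_imp h
    simp at this
  have key := chars_cond t.toList (pyBase s).toList hf
  rw [Bool.eq_iff_iff]
  simp only [Bool.or_eq_true, beq_iff_eq, PySem.Str.startswith_eq, PySem.Chars.startswith_iff,
    String.toList_append]
  have h1 : ("(" : String).toList = ['('] := by decide
  rw [h1]
  constructor
  · intro h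
    have h0 : t.toList = (pyBase s).toList ∨ (pyBase s).toList ++ ['('] <+: t.toList := by
      rcases h with h | h
      · left; rw [h]
      · right; exact h
    have h2 := key.mp h0
    apply String.toList_inj.mp
    rw [toList_pyBase, h2]
  · intro h
    have h2 : t.toList.takeWhile (· ≠ '(') = (pyBase s).toList := by
      rw [← toList_pyBase, h]
    rcases key.mpr h2 with h3 | h3
    · left; exact String.toList_inj.mp h3
    · right; exact h3

-- ---- the common normal form of both ports ----

def matchesFrom (tokens : List String) (j0 : Int) (b : String) : List Int :=
  (PySem.List.pyRange j0 (tokens.length : Int) 1).filter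
    (fun j => pyBase (PySem.List.pyGetD tokens j "") == b)

def defChunk (tokens : List String) (i : Int) : List Int :=
  matchesFrom tokens (i + 2) (pyBase (PySem.List.pyGetD tokens (i + 1) ""))

def isDefAt (tokens : List String) (i : Int) : Bool :=
  PySem.List.pyGetD tokens i "" == "def"

def normalForm (tokens : List String) : List Int :=
  (((PySem.List.pyRange 0 ((tokens.length : Int) - 1) 1).filter (isDefAt tokens)).map
    (defChunk tokens)).flatten

lemma flatMap_if {α β : Type} (l : List α) (p : α → Bool) (f : α → List β) :
    l.flatMap (fun i => if p i then f i else []) = ((l.filter p).map f).flatten := by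
  induction l with
  | nil => simp
  | cons x xs ih =>
    by_cases h : p x <;> simp [h, ih]

-- ---- A equals the normal form ----
lemma A_eq_normal (tokens : List String) : detect_self_recursion_py tokens = normalForm tokens := by
  unfold detect_self_recursion_py normalForm
  rw [← flatMap_if]
  rw [PySem.List.foldl_congr_mem _ _
    (fun (acc : List Int) (i : Int) => acc ++ (if isDefAt tokens i then defChunk tokens i else [])) []
    ?_ ]
  · rw [PySem.List.foldl_append_eq_flatMap]
    simp
  · intro acc i hi
    obtain ⟨h0, h1⟩ := PySem.List.mem_pyRange_one.mp hi
    have hdec : decide (i + 1 < (tokens.length : Int)) = true := by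
      simp only [decide_eq_true_eq]; omega
    rw [hdec, Bool.and_true]
    by_cases hdef : isDefAt tokens i = true
    · have hdef' : (PySem.List.pyGetD tokens i "" == "def") = true := hdef
      rw [if_pos hdef']
      show _ = acc ++ (if isDefAt tokens i then defChunk tokens i else [])
      rw [if_pos hdef]
      simp only [cond_eq]
      rw [PySem.List.foldl_append_if_eq_filter]
      rfl
    · have hdef' : ¬ ((PySem.List.pyGetD tokens i "" == "def") = true) := hdef
      rw [if_neg hdef']
      show acc = acc ++ (if isDefAt tokens i then defChunk tokens i else [])
      rw [if_neg hdef]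
      simp

-- ---- B equals the normal form ----

def descChunks (tokens : List String) (m : Int) : List (List Int) :=
  ((PySem.List.pyRange 0 m 1).reverse.filter (isDefAt tokens)).map (defChunk tokens)

lemma matchesFrom_cons (tokens : List String) (j0 : Int) (b : String)
    (h : j0 < (tokens.length : Int)) :
    matchesFrom tokens j0 b =
      (if pyBase (PySem.List.pyGetD tokens j0 "") == b then [j0] else []) ++ matchesFrom tokens (j0 + 1) b := by
  unfold matchesFrom
  rw [PySem.List.pyRange_one_cons h, List.filter_cons]
  split <;> simp

lemma descChunks_succ (tokens : List String) (m : Int) (h : 0 ≤ m) :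
    descChunks tokens (m + 1) =
      (if isDefAt tokens m then [defChunk tokens m] else []) ++ descChunks tokens m := by
  unfold descChunks
  rw [PySem.List.pyRange_one_succ_right h, List.reverse_append]
  simp only [List.reverse_cons, List.reverse_nil, List.nil_append, List.singleton_append,
    List.filter_cons]
  by_cases hdef : isDefAt tokens m
  · rw [if_pos hdef, if_pos hdef]
    simp
  · simp [hdef]

def stepB (tokens : List String) (st : PySem.Dict String (List Int) × List (List Int)) (i : Int) :
    PySem.Dict String (List Int) × List (List Int) :=
  let base := pyBase (PySem.List.pyGetD tokens (i + 1) "")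
  let chunks := if PySem.List.pyGetD tokens i "" == "def"
    then st.2 ++ [st.1.getD base []] else st.2
  (st.1.insert base ((i + 1) :: st.1.getD base []), chunks)

lemma loopB (tokens : List String) (m : Nat) :
    ∀ (later : PySem.Dict String (List Int)) (chunks : List (List Int)),
    (m : Int) ≤ (tokens.length : Int) - 1 →
    (∀ b, later.getD b [] = matchesFrom tokens ((m : Int) + 1) b) →
    ((PySem.List.pyRange ((m : Int) - 1) (-1) (-1)).foldl (stepB tokens) (later, chunks)).2
      = chunks ++ descChunks tokens (m : Int) := by
  induction m with
  | zero =>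
    intro later chunks _ _
    rw [PySem.List.pyRange_neg_one_eq_nil (by norm_num)]
    simp [descChunks, PySem.List.pyRange_one_eq_nil (le_refl (0 : Int))]
  | succ m ih =>
    intro later chunks h hinv
    have hcast : ((m + 1 : Nat) : Int) - 1 = (m : Int) := by push_cast; ring
    rw [hcast, PySem.List.pyRange_neg_one_cons (by omega : (-1 : Int) < (m : Int)), List.foldl_cons]
    have hlt : (m : Int) + 1 < (tokens.length : Int) := by push_cast at h; omega
    have hinv' : ∀ b, later.getD b [] = matchesFrom tokens ((m : Int) + 2) b := by
      intro b
      have hx := hinv b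
      rwa [show ((m + 1 : Nat) : Int) + 1 = (m : Int) + 2 by push_cast; ring] at hx
    set base := pyBase (PySem.List.pyGetD tokens ((m : Int) + 1) "") with hbasedef
    have hbase : later.getD base [] = matchesFrom tokens ((m : Int) + 2) base := hinv' _
    have hstep : stepB tokens (later, chunks) (m : Int) =
        (later.insert base (((m : Int) + 1) :: later.getD base []),
         if PySem.List.pyGetD tokens (m : Int) "" == "def"
           then chunks ++ [later.getD base []] else chunks) := rfl
    rw [hstep, ih _ _ (by push_cast at h ⊢; omega) ?_]
    · have hsucc := descChunks_succ tokens (m : Int) (by positivity)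
      have hgoal : ((m + 1 : Nat) : Int) = (m : Int) + 1 := by push_cast; ring
      rw [hgoal, hsucc]
      unfold isDefAt defChunk
      by_cases hdef : PySem.List.pyGetD tokens (m : Int) "" == "def"
      · rw [if_pos hdef, if_pos hdef, hbase]
        simp [hbasedef]
      · rw [if_neg hdef, if_neg hdef]
        simp
    · intro b
      rw [PySem.Dict.getD_insert]
      rw [matchesFrom_cons tokens ((m : Int) + 1) b hlt]
      by_cases hb : b = base
      · rw [if_pos hb, hb, ← hbasedef, if_pos (by simp), hbase,
          show (m : Int) + 1 + 1 = (m : Int) + 2 by ring]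
        rfl
      · have hb' : ¬ (pyBase (PySem.List.pyGetD tokens ((m : Int) + 1) "") = b) :=
          fun hh => hb ((hbasedef.trans hh).symm)
        rw [if_neg hb, if_neg (by simp [hb']), hinv' b,
          show (m : Int) + 1 + 1 = (m : Int) + 2 by ring, List.nil_append]

lemma B_eq_normal (tokens : List String) : detect_self_recursion_py_alt tokens = normalForm tokens := by
  rcases tokens with _ | ⟨t0, rest⟩
  · rfl
  · set tokens := t0 :: rest with htk
    have halt : detect_self_recursion_py_alt tokens =
        (((PySem.List.pyRange ((tokens.length : Int) - 2) (-1) (-1)).foldl (stepB tokens)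
          (PySem.Dict.empty, [])).2).reverse.foldl (fun out cell => out ++ cell) [] := rfl
    rw [halt]
    have hlen : 1 ≤ tokens.length := by simp [htk]
    have hc1 : ((tokens.length - 1 : Nat) : Int) = (tokens.length : Int) - 1 := by
      push_cast [hlen]; ring
    have hloop := loopB tokens (tokens.length - 1) PySem.Dict.empty []
      (by rw [hc1]) ?_
    · have hc2 : (tokens.length : Int) - 2 = ((tokens.length - 1 : Nat) : Int) - 1 := by
        rw [hc1]; ring
      rw [hc2, hloop, List.nil_append, hc1]
      rw [PySem.List.foldl_append_eq_flatten]
      unfold descChunks normalForm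
      rw [List.filter_reverse, List.map_reverse, List.reverse_reverse, List.nil_append]
    · intro b
      rw [PySem.Dict.getD_empty]
      unfold matchesFrom
      rw [show ((tokens.length - 1 : Nat) : Int) + 1 = (tokens.length : Int) by rw [hc1]; ring]
      rw [PySem.List.pyRange_one_eq_nil (le_refl _)]
      rfl

-- ===== VERDICT (by name: the statement is the Claim_ definition above) =====
theorem detect_self_recursion_py_spec : Claim_equal_detect_self_recursion_py := by
  intro tokens _
  unfold Spec_detect_self_recursion_py
  rw [A_eq_normal, B_eq_normal]
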